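-- pv_equiv track=rewrite | github.com/PennShenLab/mref-ad | scripts/baselines/__init__.py | build_run_baselines
-- ===== SOURCE A (Python) =====
-- from typing import List, Tuple
--
-- def build_run_baselines(baseline_arg: str, mods: List[str]) -> List[Tuple[str, str, str | None]]:
--     """Resolve a CLI `--baseline` argument into a list of runs.
--
--     Returns a list of tuples (key, btype, mod) where:
--       - key: stable result key used in JSON outputs
--       - btype: canonical baseline type used by the runner switch in the CLI
--       - mod: optional modality name for per-modality runs
--
--     This mirrors the logic previously embedded in `scripts/train_baselines.py`.
--     """
--     run_baselines = []
--     # single-modality LR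
--     if baseline_arg in ("single", "all"):
--         for m in mods:
--             run_baselines.append(("single_" + m, "single", m))
--
--     # concat / latefusion (non-MLP)
--     if baseline_arg in ("concat", "all") and len(mods) >= 2:
--         run_baselines.append(("concat_all", "concat", None))
--     if baseline_arg in ("latefusion", "all") and len(mods) >= 2:
--         run_baselines.append(("latefusion_avg", "latefusion", None))
--
--     # MLP variants
--     if baseline_arg in ("mlp_single", "mlp_all", "all"):
--         for m in mods:
--             run_baselines.append((f"mlp_single_{m}", "mlp_single", m))
--     if baseline_arg in ("mlp_concat", "mlp_all", "all") and len(mods) >= 2: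
--         run_baselines.append(("mlp_concat_all", "mlp_concat", None))
--     if baseline_arg in ("mlp_latefusion", "mlp_all", "all") and len(mods) >= 2:
--         run_baselines.append(("mlp_latefusion_avg", "mlp_latefusion", None))
--
--     # classical ML algorithms (all features)
--     if baseline_arg == "rf_all":
--         run_baselines.append(("rf_concat_all", "rf", None))
--     if baseline_arg == "xgb_all":
--         run_baselines.append(("xgb_concat_all", "xgb", None))
--     if baseline_arg == "lr_all":
--         run_baselines.append(("lr_concat_all", "lr", None))
--
--     # FT-Transformer (official only). Accept legacy 'ftt_all' as alias.
--     if baseline_arg in ("ftt_all", "ftt"):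
--         run_baselines.append(("ftt_concat_all", "ftt", None))
--
--     return run_baselines
-- ===== SOURCE B (Python) =====
-- from typing import List, Tuple
--
-- # Two-stage design: (1) normalize the CLI argument to a list of canonical
-- # baseline types (expanding the aliases "all", "mlp_all", "rf_all", ...);
-- # (2) emit the run tuples for each canonical type in turn.
--
-- _CANONICAL = ["single", "concat", "latefusion", "mlp_single", "mlp_concat", "mlp_latefusion"]
--
-- def _resolve(baseline_arg: str) -> List[str]:
--     """Expand a CLI argument into the canonical baseline types it denotes."""
--     if baseline_arg == "all":
--         return _CANONICAL
--     if baseline_arg == "mlp_all":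
--         return _CANONICAL[3:]
--     if baseline_arg == "rf_all":
--         return ["rf"]
--     if baseline_arg == "xgb_all":
--         return ["xgb"]
--     if baseline_arg == "lr_all":
--         return ["lr"]
--     if baseline_arg in ("ftt", "ftt_all"):
--         return ["ftt"]
--     if baseline_arg in _CANONICAL:
--         return [baseline_arg]
--     return []
--
-- def _emit(btype: str, mods: List[str]) -> List[Tuple[str, str, str | None]]:
--     """Run tuples for one canonical baseline type."""
--     if btype == "single":
--         return [("single_" + m, "single", m) for m in mods]
--     if btype == "mlp_single":
--         return [("mlp_single_" + m, "mlp_single", m) for m in mods]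
--     # fusion baselines need at least two modalities
--     if btype in ("concat", "latefusion", "mlp_concat", "mlp_latefusion") and len(mods) < 2:
--         return []
--     key = {"concat": "concat_all", "latefusion": "latefusion_avg",
--            "mlp_concat": "mlp_concat_all", "mlp_latefusion": "mlp_latefusion_avg",
--            "rf": "rf_concat_all", "xgb": "xgb_concat_all",
--            "lr": "lr_concat_all", "ftt": "ftt_concat_all"}[btype]
--     return [(key, btype, None)]
--
-- def build_run_baselines(baseline_arg: str, mods: List[str]) -> List[Tuple[str, str, str | None]]:
--     out: List[Tuple[str, str, str | None]] = []
--     for bt in _resolve(baseline_arg):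
--         out.extend(_emit(bt, mods))
--     return out
-- ===== Notes on version B (the rewrite author's own statement) =====
-- stated objective: simpler
-- what changed: Two-stage decomposition: the argument is first normalized into the list of canonical baseline types it denotes (expanding the aliases all/mlp_all/rf_all/...), and a separate emitter then produces the run tuples for each canonical type, instead of A's single chain of ten membership-tested if-blocks.
import Mathlib
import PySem

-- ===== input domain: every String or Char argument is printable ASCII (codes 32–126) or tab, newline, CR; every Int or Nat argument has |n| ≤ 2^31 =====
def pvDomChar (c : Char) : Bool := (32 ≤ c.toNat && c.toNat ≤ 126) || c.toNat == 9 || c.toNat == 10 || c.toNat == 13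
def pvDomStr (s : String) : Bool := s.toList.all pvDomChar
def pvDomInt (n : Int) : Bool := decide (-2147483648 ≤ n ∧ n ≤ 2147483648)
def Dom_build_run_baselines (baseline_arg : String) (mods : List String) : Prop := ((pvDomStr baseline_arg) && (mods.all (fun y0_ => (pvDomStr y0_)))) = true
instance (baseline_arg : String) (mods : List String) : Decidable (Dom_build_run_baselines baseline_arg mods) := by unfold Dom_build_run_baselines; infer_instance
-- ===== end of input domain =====

-- B replaces A's chain of ten if-blocks by a two-stage pipeline: normalize the
-- argument into canonical baseline types, then emit runs per type (simpler decomposition, same cost).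

-- ===== PORT A =====
def build_run_baselines (baseline_arg : String) (mods : List String) : List (String × String × Option String) :=
  let rb : List (String × String × Option String) := []
  -- single-modality LR
  let rb := if baseline_arg = "single" ∨ baseline_arg = "all" then
      mods.foldl (fun acc m => acc ++ [("single_" ++ m, "single", some m)]) rb else rb
  -- concat / latefusion (non-MLP)
  let rb := if (baseline_arg = "concat" ∨ baseline_arg = "all") ∧ 2 ≤ mods.length then
      rb ++ [("concat_all", "concat", none)] else rb
  let rb := if (baseline_arg = "latefusion" ∨ baseline_arg = "all") ∧ 2 ≤ mods.length then
      rb ++ [("latefusion_avg", "latefusion", none)] else rb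
  -- MLP variants
  let rb := if baseline_arg = "mlp_single" ∨ baseline_arg = "mlp_all" ∨ baseline_arg = "all" then
      mods.foldl (fun acc m => acc ++ [("mlp_single_" ++ m, "mlp_single", some m)]) rb else rb
  let rb := if (baseline_arg = "mlp_concat" ∨ baseline_arg = "mlp_all" ∨ baseline_arg = "all") ∧ 2 ≤ mods.length then
      rb ++ [("mlp_concat_all", "mlp_concat", none)] else rb
  let rb := if (baseline_arg = "mlp_latefusion" ∨ baseline_arg = "mlp_all" ∨ baseline_arg = "all") ∧ 2 ≤ mods.length then
      rb ++ [("mlp_latefusion_avg", "mlp_latefusion", none)] else rb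
  -- classical ML algorithms (all features)
  let rb := if baseline_arg = "rf_all" then rb ++ [("rf_concat_all", "rf", none)] else rb
  let rb := if baseline_arg = "xgb_all" then rb ++ [("xgb_concat_all", "xgb", none)] else rb
  let rb := if baseline_arg = "lr_all" then rb ++ [("lr_concat_all", "lr", none)] else rb
  -- FT-Transformer (official only); legacy alias
  let rb := if baseline_arg = "ftt_all" ∨ baseline_arg = "ftt" then rb ++ [("ftt_concat_all", "ftt", none)] else rb
  rb

-- ===== PORT B =====
def pvCanonical : List String := ["single", "concat", "latefusion", "mlp_single", "mlp_concat", "mlp_latefusion"]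

-- stage 1: expand a CLI argument into the canonical baseline types it denotes
def pvResolve (baseline_arg : String) : List String :=
  if baseline_arg = "all" then pvCanonical
  else if baseline_arg = "mlp_all" then pvCanonical.drop 3
  else if baseline_arg = "rf_all" then ["rf"]
  else if baseline_arg = "xgb_all" then ["xgb"]
  else if baseline_arg = "lr_all" then ["lr"]
  else if baseline_arg = "ftt" ∨ baseline_arg = "ftt_all" then ["ftt"]
  else if baseline_arg ∈ pvCanonical then [baseline_arg]
  else []

-- stage 2: run tuples for one canonical baseline type
def pvEmit (btype : String) (mods : List String) : List (String × String × Option String) :=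
  if btype = "single" then mods.map (fun m => ("single_" ++ m, "single", some m))
  else if btype = "mlp_single" then mods.map (fun m => ("mlp_single_" ++ m, "mlp_single", some m))
  else if (btype = "concat" ∨ btype = "latefusion" ∨ btype = "mlp_concat" ∨ btype = "mlp_latefusion") ∧ mods.length < 2 then []
  else
    let key := if btype = "concat" then "concat_all"
      else if btype = "latefusion" then "latefusion_avg"
      else if btype = "mlp_concat" then "mlp_concat_all"
      else if btype = "mlp_latefusion" then "mlp_latefusion_avg"
      else if btype = "rf" then "rf_concat_all"
      else if btype = "xgb" then "xgb_concat_all"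
      else if btype = "lr" then "lr_concat_all"
      else "ftt_concat_all"
    [(key, btype, none)]

def build_run_baselines_alt (baseline_arg : String) (mods : List String) : List (String × String × Option String) :=
  (pvResolve baseline_arg).foldl (fun out bt => out ++ pvEmit bt mods) []

-- ===== PRECONDITION & SPEC =====
def Spec_build_run_baselines (baseline_arg : String) (mods : List String) (out : List (String × String × Option String)) : Prop := out = build_run_baselines_alt baseline_arg mods
instance (baseline_arg : String) (mods : List String) (out : List (String × String × Option String)) : Decidable (Spec_build_run_baselines baseline_arg mods out) := by unfold Spec_build_run_baselines; infer_instance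

-- ===== CLAIM (what is proved, stated in full; the proofs are below) =====
def Claim_equal_build_run_baselines : Prop := ∀ (baseline_arg : String) (mods : List String), Dom_build_run_baselines baseline_arg mods → Spec_build_run_baselines baseline_arg mods (build_run_baselines baseline_arg mods)

-- ===== LEMMAS AND PROOFS =====

theorem pv_flatten_singleton {α β : Type} (f : α → β) (xs : List α) :
    (xs.map (fun x => [f x])).flatten = xs.map f := by
  induction xs with
  | nil => simp
  | cons x xs ih => simp [ih]

-- ===== VERDICT (by name: the statement is the Claim_ definition above) =====
theorem build_run_baselines_spec : Claim_equal_build_run_baselines := by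
  intro b mods _
  unfold Spec_build_run_baselines
  by_cases h1 : b = "all"
  · subst h1
    by_cases h : 2 ≤ mods.length
    · have h' : ¬ mods.length < 2 := by omega
      simp [build_run_baselines, build_run_baselines_alt, pvResolve, pvCanonical, pvEmit,
        pv_flatten_singleton, h, h']
    · have h' : mods.length < 2 := by omega
      simp [build_run_baselines, build_run_baselines_alt, pvResolve, pvCanonical, pvEmit,
        pv_flatten_singleton, h, h']
  all_goals by_cases h2 : b = "mlp_all"
  · subst h2
    by_cases h : 2 ≤ mods.length
    · have h' : ¬ mods.length < 2 := by omega
      simp [build_run_baselines, build_run_baselines_alt, pvResolve, pvCanonical, pvEmit,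
        pv_flatten_singleton, h, h']
    · have h' : mods.length < 2 := by omega
      simp [build_run_baselines, build_run_baselines_alt, pvResolve, pvCanonical, pvEmit,
        pv_flatten_singleton, h, h']
  all_goals by_cases h3 : b = "single"
  · subst h3
    simp [build_run_baselines, build_run_baselines_alt, pvResolve, pvCanonical, pvEmit,
      pv_flatten_singleton]
  all_goals by_cases h4 : b = "concat"
  · subst h4
    by_cases h : 2 ≤ mods.length
    · have h' : ¬ mods.length < 2 := by omega
      simp [build_run_baselines, build_run_baselines_alt, pvResolve, pvCanonical, pvEmit, h, h']
    · have h' : mods.length < 2 := by omega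
      simp [build_run_baselines, build_run_baselines_alt, pvResolve, pvCanonical, pvEmit, h, h']
  all_goals by_cases h5 : b = "latefusion"
  · subst h5
    by_cases h : 2 ≤ mods.length
    · have h' : ¬ mods.length < 2 := by omega
      simp [build_run_baselines, build_run_baselines_alt, pvResolve, pvCanonical, pvEmit, h, h']
    · have h' : mods.length < 2 := by omega
      simp [build_run_baselines, build_run_baselines_alt, pvResolve, pvCanonical, pvEmit, h, h']
  all_goals by_cases h6 : b = "mlp_single"
  · subst h6
    simp [build_run_baselines, build_run_baselines_alt, pvResolve, pvCanonical, pvEmit,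
      pv_flatten_singleton]
  all_goals by_cases h7 : b = "mlp_concat"
  · subst h7
    by_cases h : 2 ≤ mods.length
    · have h' : ¬ mods.length < 2 := by omega
      simp [build_run_baselines, build_run_baselines_alt, pvResolve, pvCanonical, pvEmit, h, h']
    · have h' : mods.length < 2 := by omega
      simp [build_run_baselines, build_run_baselines_alt, pvResolve, pvCanonical, pvEmit, h, h']
  all_goals by_cases h8 : b = "mlp_latefusion"
  · subst h8
    by_cases h : 2 ≤ mods.length
    · have h' : ¬ mods.length < 2 := by omega
      simp [build_run_baselines, build_run_baselines_alt, pvResolve, pvCanonical, pvEmit, h, h']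
    · have h' : mods.length < 2 := by omega
      simp [build_run_baselines, build_run_baselines_alt, pvResolve, pvCanonical, pvEmit, h, h']
  all_goals by_cases h9 : b = "rf_all"
  · subst h9
    simp [build_run_baselines, build_run_baselines_alt, pvResolve, pvEmit]
  all_goals by_cases h10 : b = "xgb_all"
  · subst h10
    simp [build_run_baselines, build_run_baselines_alt, pvResolve, pvEmit]
  all_goals by_cases h11 : b = "lr_all"
  · subst h11
    simp [build_run_baselines, build_run_baselines_alt, pvResolve, pvEmit]
  all_goals by_cases h12 : b = "ftt_all"
  · subst h12
    simp [build_run_baselines, build_run_baselines_alt, pvResolve, pvEmit]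
  all_goals by_cases h13 : b = "ftt"
  · subst h13
    simp [build_run_baselines, build_run_baselines_alt, pvResolve, pvEmit]
  · simp [build_run_baselines, build_run_baselines_alt, pvResolve, pvCanonical,
      h1, h2, h3, h4, h5, h6, h7, h8, h9, h10, h11, h12, h13]
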